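-- pv_equiv track=rewrite | github.com/smncrm/BA_Informatik_Py | min_acfg.py | calc_value
-- ===== SOURCE A (Python) =====
-- def calc_value(coalition, n, player, friends):
--     """
--     calculate the value of the given coalition for the given player
--     :param coalition: The coalition
--     :param n: Number of players in the game
--     :param player: The player to consider
--     :param friends: The player's friends
--     :return: The numerical value the player assigns to the coalition
--     """
--     v = 0
--     for p in coalition:
--         if p == player:
--             continue
--         elif p in friends:
--             v += n
--         else:
--             v -= 1
--     return v
-- ===== SOURCE B (Python) =====
-- def calc_value(coalition, n, player, friends):
--     fs = set(friends)
--     friend_count = sum(1 for p in coalition if p != player and p in fs)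
--     m = len(coalition) - coalition.count(player)
--     return (n + 1) * friend_count - m
-- ===== Notes on version B (the rewrite author's own statement) =====
-- stated objective: faster
-- what changed: Replaces the per-element +n/-1 branching accumulation with the closed form (n+1)*friend_count - m over two counts (friend members and non-player members), with a set replacing the per-element scan of friends.
import Mathlib
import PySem

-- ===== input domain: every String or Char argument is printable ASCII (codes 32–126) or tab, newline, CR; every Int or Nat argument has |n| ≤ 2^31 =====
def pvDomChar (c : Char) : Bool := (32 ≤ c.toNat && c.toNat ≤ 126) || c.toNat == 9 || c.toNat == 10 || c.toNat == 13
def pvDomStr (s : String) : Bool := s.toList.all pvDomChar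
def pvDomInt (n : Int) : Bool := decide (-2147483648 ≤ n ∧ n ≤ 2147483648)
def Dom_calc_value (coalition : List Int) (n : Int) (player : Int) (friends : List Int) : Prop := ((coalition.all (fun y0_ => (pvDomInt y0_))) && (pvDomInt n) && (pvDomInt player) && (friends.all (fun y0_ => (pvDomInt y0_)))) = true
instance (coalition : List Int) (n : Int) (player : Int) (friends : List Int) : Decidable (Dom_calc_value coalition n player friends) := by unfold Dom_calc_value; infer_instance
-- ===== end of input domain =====

-- B replaces A's per-element +n/-1 accumulation by the closed form (n+1)*friend_count - m over two counts (objective: simpler).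

-- ===== PORT A =====
-- literal port of A's loop: v starts at 0; skip player, +n for friends, -1 otherwise
def calc_value (coalition : List Int) (n : Int) (player : Int) (friends : List Int) : Int :=
  coalition.foldl
    (fun v p =>
      if p == player then v
      else if friends.contains p then v + n
      else v - 1)
    0

-- ===== PORT B =====
-- port of Source B: friend set, two counts, closed form
def calc_value_alt (coalition : List Int) (n : Int) (player : Int) (friends : List Int) : Int :=
  let fs : PySem.Set Int := PySem.Set.ofList friends
  let friend_count : Int := (coalition.countP (fun p => p != player && PySem.Set.contains fs p) : Int)
  let m : Int := (coalition.length : Int) - (PySem.List.count coalition player : Int)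
  (n + 1) * friend_count - m

-- ===== PRECONDITION & SPEC =====
def Spec_calc_value (coalition : List Int) (n : Int) (player : Int) (friends : List Int) (out : Int) : Prop := out = calc_value_alt coalition n player friends
instance (coalition : List Int) (n : Int) (player : Int) (friends : List Int) (out : Int) : Decidable (Spec_calc_value coalition n player friends out) := by unfold Spec_calc_value; infer_instance

-- ===== CLAIM (what is proved, stated in full; the proofs are below) =====
def Claim_equal_calc_value : Prop := ∀ (coalition : List Int) (n : Int) (player : Int) (friends : List Int), Dom_calc_value coalition n player friends → Spec_calc_value coalition n player friends (calc_value coalition n player friends)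

-- ===== LEMMAS AND PROOFS =====

-- loop invariant: A's fold from any accumulator equals acc + closed form
theorem calc_value_fold_inv (coalition : List Int) (n player : Int) (friends : List Int) (acc : Int) :
    coalition.foldl
      (fun v p => if p == player then v else if friends.contains p then v + n else v - 1) acc
    = acc + (n + 1) * (coalition.countP (fun p => p != player && friends.contains p) : Int)
        - ((coalition.length : Int) - (coalition.count player : Int)) := by
  induction coalition generalizing acc with
  | nil => simp
  | cons x xs ih =>
    simp only [List.foldl_cons, List.countP_cons, List.count_cons, List.length_cons, ih]
    by_cases hx : x = player
    · simp [hx]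
    · have hx' : (x == player) = false := by simp [hx]
      by_cases hf : x ∈ friends
      · simp [hx', hf, hx]
        ring
      · simp [hx', hf]
        ring

theorem set_ofList_contains (friends : List Int) (p : Int) :
    PySem.Set.contains (PySem.Set.ofList friends) p = friends.contains p := by
  simp [PySem.Set.contains, PySem.Set.mem_ofList]

-- ===== VERDICT (by name: the statement is the Claim_ definition above) =====
theorem calc_value_spec : Claim_equal_calc_value := by
  intro coalition n player friends _
  unfold Spec_calc_value calc_value calc_value_alt
  simp only [set_ofList_contains, PySem.List.count_eq]
  simpa using calc_value_fold_inv coalition n player friends 0
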